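-- pv_equiv track=rewrite | github.com/ssh-vom/analytics-agent | backend/semantic/catalog.py | infer_semantic_type
-- ===== SOURCE A (Python) =====
-- def is_numeric_type(data_type: str) -> bool:
--     """Check if a DuckDB type is numeric."""
--     numeric_types = {
--         "tinyint",
--         "smallint",
--         "integer",
--         "bigint",
--         "hugeint",
--         "utinyint",
--         "usmallint",
--         "uinteger",
--         "ubigint",
--         "real",
--         "double",
--         "float",
--         "decimal",
--         "numeric",
--     }
--     return data_type.lower() in numeric_types
--
-- def infer_semantic_type(column_name: str, data_type: str) -> str | None:
--     """Infer semantic type (e.g., currency, percentage) from column name."""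
--     name_lower = column_name.lower()
--
--     # Currency patterns
--     currency_patterns = {
--         "price",
--         "cost",
--         "revenue",
--         "sales",
--         "amount",
--         "value",
--         "fee",
--         "charge",
--     }
--     if any(pattern in name_lower for pattern in currency_patterns):
--         if is_numeric_type(data_type):
--             return "currency"
--
--     # Percentage patterns
--     pct_patterns = {"pct", "percent", "rate", "ratio", "margin", "share"}
--     if any(pattern in name_lower for pattern in pct_patterns):
--         if is_numeric_type(data_type):
--             return "percentage"
--
--     # Count patterns
--     count_patterns = {"count", "quantity", "qty", "volume", "total"}
--     if any(pattern in name_lower for pattern in count_patterns):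
--         if is_numeric_type(data_type):
--             return "count"
--
--     return None
-- ===== SOURCE B (Python) =====
-- def is_numeric_type(data_type: str) -> bool:
--     numeric_types = {
--         "tinyint", "smallint", "integer", "bigint", "hugeint",
--         "utinyint", "usmallint", "uinteger", "ubigint",
--         "real", "double", "float", "decimal", "numeric",
--     }
--     return data_type.lower() in numeric_types
--
--
-- # One hash map keyed by pattern; value = category priority (0 currency, 1 percentage, 2 count).
-- _PRIORITY = {
--     "price": 0, "cost": 0, "revenue": 0, "sales": 0,
--     "amount": 0, "value": 0, "fee": 0, "charge": 0,
--     "pct": 1, "percent": 1, "rate": 1, "ratio": 1, "margin": 1, "share": 1,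
--     "count": 2, "quantity": 2, "qty": 2, "volume": 2, "total": 2,
-- }
--
--
-- def infer_semantic_type(column_name: str, data_type: str) -> str | None:
--     # Every label requires a numeric type, so check once up front.
--     if not is_numeric_type(data_type):
--         return None
--     s = column_name.lower()
--     # Enumerate substrings (pattern lengths are 3..8) and look them up in the
--     # hash map; keep the smallest priority seen.  Correct because a pattern
--     # occurs in s iff it equals some substring of s.
--     best = 3
--     for i in range(len(s)):
--         for L in range(3, 9):
--             pr = _PRIORITY.get(s[i:i + L])
--             if pr is not None and pr < best:
--                 best = pr
--     return {0: "currency", 1: "percentage", 2: "count"}.get(best)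
-- ===== Notes on version B (the rewrite author's own statement) =====
-- stated objective: alternative
-- what changed: Replaces A's per-pattern substring searches over three pattern sets with a single hash map pattern->priority: B enumerates the substrings of the lowered name (lengths 3-8), looks each up in the map, keeps the minimum priority, and checks the numeric-type gate once up front.
import Mathlib
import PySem

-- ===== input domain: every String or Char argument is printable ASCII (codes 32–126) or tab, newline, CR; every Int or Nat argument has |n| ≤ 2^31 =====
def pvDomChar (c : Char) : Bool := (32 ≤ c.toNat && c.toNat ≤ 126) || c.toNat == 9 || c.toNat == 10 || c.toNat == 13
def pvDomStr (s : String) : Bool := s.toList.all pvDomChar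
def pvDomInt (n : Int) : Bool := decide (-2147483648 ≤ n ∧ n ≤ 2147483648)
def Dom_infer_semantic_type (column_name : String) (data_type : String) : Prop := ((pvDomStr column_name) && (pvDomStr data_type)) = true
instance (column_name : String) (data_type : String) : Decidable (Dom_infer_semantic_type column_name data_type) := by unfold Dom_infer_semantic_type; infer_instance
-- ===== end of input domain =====

-- B replaces A's per-pattern substring searches with one hash map pattern→priority,
-- looked up on every substring (lengths 3–8) of the lowered name; minimum priority wins.

-- ===== PORT A =====
def is_numeric_type (data_type : String) : Bool :=
  -- Python set literal of type names; membership test (order irrelevant for `in`)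
  let numeric_types : List String :=
    ["tinyint", "smallint", "integer", "bigint", "hugeint", "utinyint", "usmallint",
     "uinteger", "ubigint", "real", "double", "float", "decimal", "numeric"]
  numeric_types.contains (PySem.Str.lower data_type)

def infer_semantic_type (column_name : String) (data_type : String) : Option String :=
  let name_lower := PySem.Str.lower column_name
  let currency_patterns : List String :=
    ["price", "cost", "revenue", "sales", "amount", "value", "fee", "charge"]
  let pct_patterns : List String := ["pct", "percent", "rate", "ratio", "margin", "share"]
  let count_patterns : List String := ["count", "quantity", "qty", "volume", "total"]
  -- each block falls through to the next when its test (or the numeric check) fails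
  let step3 : Option String :=
    if count_patterns.any (fun p => PySem.Str.isIn p name_lower) then
      if is_numeric_type data_type then some "count" else none
    else none
  let step2 : Option String :=
    if pct_patterns.any (fun p => PySem.Str.isIn p name_lower) then
      if is_numeric_type data_type then some "percentage" else step3
    else step3
  if currency_patterns.any (fun p => PySem.Str.isIn p name_lower) then
    if is_numeric_type data_type then some "currency" else step2
  else step2

-- ===== PORT B =====
def is_numeric_type_alt (data_type : String) : Bool :=
  let numeric_types : List String :=
    ["tinyint", "smallint", "integer", "bigint", "hugeint", "utinyint", "usmallint",
     "uinteger", "ubigint", "real", "double", "float", "decimal", "numeric"]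
  numeric_types.contains (PySem.Str.lower data_type)

-- _PRIORITY: one hash map, pattern → category priority
def priority_dict : PySem.Dict (List Char) Nat :=
  PySem.Dict.mk [
    ("price".toList, 0), ("cost".toList, 0), ("revenue".toList, 0), ("sales".toList, 0),
    ("amount".toList, 0), ("value".toList, 0), ("fee".toList, 0), ("charge".toList, 0),
    ("pct".toList, 1), ("percent".toList, 1), ("rate".toList, 1), ("ratio".toList, 1),
    ("margin".toList, 1), ("share".toList, 1),
    ("count".toList, 2), ("quantity".toList, 2), ("qty".toList, 2), ("volume".toList, 2),
    ("total".toList, 2) ]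

def infer_semantic_type_alt (column_name : String) (data_type : String) : Option String :=
  if ! is_numeric_type_alt data_type then none
  else
    let s := PySem.Chars.lower column_name.toList
    -- s[i:i+L] for natural i, L is exactly (s.drop i).take L (PySem.List.slice_natCast_add)
    let best := (List.range s.length).foldl (fun b i =>
        (List.range' 3 6).foldl (fun b L =>
          match priority_dict.get? ((s.drop i).take L) with
          | some pr => if pr < b then pr else b
          | none => b) b) 3
    PySem.Dict.get? (PySem.Dict.mk [(0, "currency"), (1, "percentage"), (2, "count")]) best

-- ===== PRECONDITION & SPEC =====
def Spec_infer_semantic_type (column_name : String) (data_type : String) (out : Option String) : Prop := out = infer_semantic_type_alt column_name data_type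
instance (column_name : String) (data_type : String) (out : Option String) : Decidable (Spec_infer_semantic_type column_name data_type out) := by unfold Spec_infer_semantic_type; infer_instance

-- ===== CLAIM (what is proved, stated in full; the proofs are below) =====
def Claim_equal_infer_semantic_type : Prop := ∀ (column_name : String) (data_type : String), Dom_infer_semantic_type column_name data_type → Spec_infer_semantic_type column_name data_type (infer_semantic_type column_name data_type)

-- ===== LEMMAS AND PROOFS =====

-- patterns of each category, as char lists (proof-only helper)
def catOf (k : Nat) : List (List Char) :=
  if k = 0 then
    ["price".toList, "cost".toList, "revenue".toList, "sales".toList,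
     "amount".toList, "value".toList, "fee".toList, "charge".toList]
  else if k = 1 then
    ["pct".toList, "percent".toList, "rate".toList, "ratio".toList,
     "margin".toList, "share".toList]
  else if k = 2 then
    ["count".toList, "quantity".toList, "qty".toList, "volume".toList, "total".toList]
  else []

def anyCat (s : List Char) (k : Nat) : Bool :=
  (catOf k).any (fun p => PySem.Chars.isIn p s)

-- generic "minimum of successful lookups" fold
def mfold {α : Type} (f : α → Option Nat) (b : Nat) (l : List α) : Nat :=
  l.foldl (fun b x => match f x with | some pr => if pr < b then pr else b | none => b) b

theorem mfold_cons {α : Type} (f : α → Option Nat) (b : Nat) (x : α) (l : List α) :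
    mfold f b (x :: l)
      = mfold f (match f x with | some pr => if pr < b then pr else b | none => b) l := rfl

theorem mfold_le {α : Type} (f : α → Option Nat) (b : Nat) (l : List α) :
    mfold f b l ≤ b := by
  induction l generalizing b with
  | nil => simp [mfold]
  | cons x t ih =>
    rw [mfold_cons]
    cases h : f x with
    | none => exact ih b
    | some pr =>
      by_cases hpr : pr < b
      · simp only [hpr, if_pos]
        exact le_trans (ih pr) (le_of_lt hpr)
      · simp only [hpr, if_neg, not_false_iff]
        exact ih b

theorem mfold_le_of_mem {α : Type} (f : α → Option Nat) (b : Nat) (l : List α)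
    (x : α) (k : Nat) : x ∈ l → f x = some k → mfold f b l ≤ k := by
  induction l generalizing b with
  | nil => intro hx _; cases hx
  | cons y t ih =>
    intro hx hf
    rw [mfold_cons]
    rcases List.mem_cons.mp hx with h | h
    · subst h
      rw [hf]
      by_cases hk : k < b
      · simp only [hk, if_pos]; exact mfold_le f k t
      · simp only [hk, if_neg, not_false_iff]
        exact le_trans (mfold_le f b t) (le_of_not_gt hk)
    · cases hfy : f y with
      | none => exact ih b h hf
      | some pr =>
        by_cases hpr : pr < b
        · simp only [hpr, if_pos]; exact ih pr h hf
        · simp only [hpr, if_neg, not_false_iff]; exact ih b h hf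

theorem mfold_mem_or_eq {α : Type} (f : α → Option Nat) (b : Nat) (l : List α) :
    mfold f b l = b ∨ ∃ x ∈ l, f x = some (mfold f b l) := by
  induction l generalizing b with
  | nil => left; simp [mfold]
  | cons y t ih =>
    rw [mfold_cons]
    cases hfy : f y with
    | none =>
      rcases ih b with h | ⟨x, hx, hfx⟩
      · left; exact h
      · right; exact ⟨x, List.mem_cons_of_mem _ hx, hfx⟩
    | some pr =>
      by_cases hpr : pr < b
      · simp only [hpr, if_pos]
        rcases ih pr with h | ⟨x, hx, hfx⟩
        · right; exact ⟨y, List.mem_cons_self .., by rw [hfy, h]⟩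
        · right; exact ⟨x, List.mem_cons_of_mem _ hx, hfx⟩
      · simp only [hpr, if_neg, not_false_iff]
        rcases ih b with h | ⟨x, hx, hfx⟩
        · left; exact h
        · right; exact ⟨x, List.mem_cons_of_mem _ hx, hfx⟩

-- flatten the nested fold of the port into one mfold over index pairs
def pairsOf (n : Nat) : List (Nat × Nat) :=
  (List.range n).flatMap (fun i => (List.range' 3 6).map (fun L => (i, L)))

theorem mfold_append {α : Type} (f : α → Option Nat) (b : Nat) (l₁ l₂ : List α) :
    mfold f b (l₁ ++ l₂) = mfold f (mfold f b l₁) l₂ := by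
  simp [mfold, List.foldl_append]

theorem nested_eq_mfold_gen (s : List Char) (b : Nat) (l : List Nat) :
    l.foldl (fun b i =>
        (List.range' 3 6).foldl (fun b L =>
          match priority_dict.get? ((s.drop i).take L) with
          | some pr => if pr < b then pr else b
          | none => b) b) b
      = mfold (fun p : Nat × Nat => priority_dict.get? ((s.drop p.1).take p.2)) b
          (l.flatMap (fun i => (List.range' 3 6).map (fun L => (i, L)))) := by
  induction l generalizing b with
  | nil => simp [mfold]
  | cons i t ih =>
    simp only [List.foldl_cons, List.flatMap_cons]
    rw [mfold_append, ih]
    congr 1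

theorem nested_eq_mfold (s : List Char) (b : Nat) :
    (List.range s.length).foldl (fun b i =>
        (List.range' 3 6).foldl (fun b L =>
          match priority_dict.get? ((s.drop i).take L) with
          | some pr => if pr < b then pr else b
          | none => b) b) b
      = mfold (fun p : Nat × Nat => priority_dict.get? ((s.drop p.1).take p.2)) b
          (pairsOf s.length) :=
  nested_eq_mfold_gen s b (List.range s.length)

theorem mem_pairsOf {n i L : Nat} :
    (i, L) ∈ pairsOf n ↔ i < n ∧ 3 ≤ L ∧ L < 9 := by
  simp only [pairsOf, List.mem_flatMap, List.mem_map, List.mem_range, List.mem_range'_1]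
  constructor
  · rintro ⟨j, hj, Lm, hLm, h⟩
    cases h
    exact ⟨hj, hLm.1, by omega⟩
  · rintro ⟨hi, h3, h9⟩
    exact ⟨i, hi, L, ⟨h3, by omega⟩, rfl⟩

-- a successful lookup names an actual entry of the literal dict
theorem get?_mk_mem {κ ν : Type} [BEq κ] [LawfulBEq κ] (l : List (κ × ν)) (q : κ) (v : ν) :
    (PySem.Dict.mk l).get? q = some v → (q, v) ∈ l := by
  induction l with
  | nil => intro h; simp [PySem.Dict.get?] at h
  | cons p t ih =>
    obtain ⟨a, b⟩ := p
    rw [PySem.Dict.get?_mk_cons]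
    by_cases hq : (a == q) = true
    · intro h
      simp only [hq, if_pos] at h
      obtain rfl := eq_of_beq hq
      obtain rfl := Option.some.inj h
      exact List.mem_cons_self ..
    · intro h
      rw [if_neg hq] at h
      exact List.mem_cons_of_mem _ (ih h)

theorem get?_some_cat {q : List Char} {k : Nat}
    (h : priority_dict.get? q = some k) : q ∈ catOf k := by
  have hm := get?_mk_mem _ _ _ h
  fin_cases hm <;> decide

theorem cat_get? {k : Nat} (hk : k < 3) {p : List Char} (hp : p ∈ catOf k) :
    priority_dict.get? p = some k ∧ 3 ≤ p.length ∧ p.length < 9 ∧ p ≠ [] := by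
  interval_cases k <;> fin_cases hp <;> decide

-- hit ↔ some pattern of the category occurs in s
theorem hit_iff (s : List Char) (k : Nat) (hk : k < 3) :
    (∃ pr ∈ pairsOf s.length,
        priority_dict.get? ((s.drop pr.1).take pr.2) = some k) ↔ anyCat s k = true := by
  constructor
  · rintro ⟨⟨i, L⟩, hmem, hget⟩
    have hq : (s.drop i).take L ∈ catOf k := get?_some_cat hget
    have hinf : (s.drop i).take L <:+: s :=
      ((List.take_prefix L (s.drop i)).isInfix).trans (s.drop_suffix i).isInfix
    exact List.any_eq_true.mpr ⟨_, hq, (PySem.Chars.isIn_iff_infix _ _).mpr hinf⟩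
  · intro h
    obtain ⟨p, hp, hin⟩ := List.any_eq_true.mp h
    obtain ⟨hget, h3, h9, hne⟩ := cat_get? hk hp
    obtain ⟨j, hpre⟩ := (PySem.Chars.exists_prefix_drop_iff_isIn p s).mpr hin
    have hj : j < s.length := by
      by_contra hle
      have : s.drop j = [] := List.drop_eq_nil_iff.mpr (by omega)
      rw [this] at hpre
      exact hne (List.prefix_nil.mp hpre)
    have htake : (s.drop j).take p.length = p := (List.prefix_iff_eq_take.mp hpre).symm
    exact ⟨(j, p.length), mem_pairsOf.mpr ⟨hj, h3, h9⟩, by rw [htake]; exact hget⟩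

-- the fold computes the priority of the first matching category
theorem best_eq (s : List Char) :
    mfold (fun p : Nat × Nat => priority_dict.get? ((s.drop p.1).take p.2)) 3
        (pairsOf s.length)
      = (if anyCat s 0 then 0 else if anyCat s 1 then 1 else if anyCat s 2 then 2 else 3) := by
  have main : ∀ r : Nat, r ≤ 3 → (∀ k, k < 3 → anyCat s k = true → r ≤ k) →
      (r = 3 ∨ anyCat s r = true) →
      r = (if anyCat s 0 then 0 else if anyCat s 1 then 1 else if anyCat s 2 then 2 else 3) := by
    intro r hle hhit hself
    by_cases h0 : anyCat s 0 = true
    · have := hhit 0 (by omega) h0; simp [h0]; omega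
    · by_cases h1 : anyCat s 1 = true
      · have hle1 := hhit 1 (by omega) h1
        have hne0 : r ≠ 0 := by
          rintro rfl
          rcases hself with h | h
          · omega
          · exact h0 h
        simp [h0, h1]; omega
      · by_cases h2 : anyCat s 2 = true
        · have hle2 := hhit 2 (by omega) h2
          have hne0 : r ≠ 0 := by
            rintro rfl
            rcases hself with h | h
            · omega
            · exact h0 h
          have hne1 : r ≠ 1 := by
            rintro rfl
            rcases hself with h | h
            · omega
            · exact h1 h
          simp [h0, h1, h2]; omega
        · rcases hself with h | h
          · simp [h0, h1, h2, h]
          · exfalso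
            interval_cases r
            · exact h0 h
            · exact h1 h
            · exact h2 h
            · simp [anyCat, catOf] at h
  refine main _ (mfold_le _ 3 _) (fun k hk hany => ?_) ?_
  · obtain ⟨x, hx, hfx⟩ := (hit_iff s k hk).mpr hany
    exact mfold_le_of_mem _ 3 _ x k hx hfx
  · rcases mfold_mem_or_eq (fun p : Nat × Nat => priority_dict.get? ((s.drop p.1).take p.2)) 3
        (pairsOf s.length) with h | ⟨x, hx, hfx⟩
    · left; exact h
    · right
      have hq := get?_some_cat hfx
      have hr3 : mfold (fun p : Nat × Nat => priority_dict.get? ((s.drop p.1).take p.2)) 3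
          (pairsOf s.length) < 3 := by
        by_contra hge
        simp only [catOf] at hq
        rw [if_neg (by omega), if_neg (by omega), if_neg (by omega)] at hq
        cases hq
      exact (hit_iff s _ hr3).mp ⟨x, hx, hfx⟩

-- both sides reduced to the same guarded first-match chain
theorem A_eq (c d : String) :
    infer_semantic_type c d
      = (if is_numeric_type_alt d then
          (if anyCat (PySem.Chars.lower c.toList) 0 then some "currency"
           else if anyCat (PySem.Chars.lower c.toList) 1 then some "percentage"
           else if anyCat (PySem.Chars.lower c.toList) 2 then some "count" else none)
         else none) := by
  have hnum : is_numeric_type d = is_numeric_type_alt d := rfl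
  unfold infer_semantic_type
  simp only [hnum, anyCat, catOf]
  cases h1 : (["price", "cost", "revenue", "sales", "amount", "value", "fee", "charge"] :
      List String).any (fun p => PySem.Str.isIn p (PySem.Str.lower c)) <;>
  cases h2 : (["pct", "percent", "rate", "ratio", "margin", "share"] : List String).any
      (fun p => PySem.Str.isIn p (PySem.Str.lower c)) <;>
  cases h3 : (["count", "quantity", "qty", "volume", "total"] : List String).any
      (fun p => PySem.Str.isIn p (PySem.Str.lower c)) <;>
  cases h4 : is_numeric_type_alt d <;>
    simp_all [PySem.Str.isIn, PySem.Str.toList_lower]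

theorem B_eq (c d : String) :
    infer_semantic_type_alt c d
      = (if is_numeric_type_alt d then
          (if anyCat (PySem.Chars.lower c.toList) 0 then some "currency"
           else if anyCat (PySem.Chars.lower c.toList) 1 then some "percentage"
           else if anyCat (PySem.Chars.lower c.toList) 2 then some "count" else none)
         else none) := by
  unfold infer_semantic_type_alt
  cases h4 : is_numeric_type_alt d
  · simp
  · simp only [Bool.not_true, Bool.false_eq_true, if_pos]
    rw [nested_eq_mfold, best_eq]
    set s := PySem.Chars.lower c.toList
    by_cases h0 : anyCat s 0 = true <;> by_cases h1 : anyCat s 1 = true <;>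
      by_cases h2 : anyCat s 2 = true <;>
      simp [h0, h1, h2, PySem.Dict.get?]

-- ===== VERDICT (by name: the statement is the Claim_ definition above) =====
theorem infer_semantic_type_spec : Claim_equal_infer_semantic_type := by
  intro c d _
  unfold Spec_infer_semantic_type
  rw [A_eq, B_eq]
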